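-- pv_equiv track=rewrite | github.com/tscizzle/bs-poker-simulation | poker.py | one_pair_finder
-- ===== SOURCE A (Python) =====
-- from collections import Counter, defaultdict
--
-- def get_card_rank(card):
--     return (card % 13) + 2
--
-- def one_pair_finder(natural_cards, num_wilds=0):
--     rank_counts = Counter(get_card_rank(card) for card in natural_cards)
--
--     if num_wilds == 0:
--         pair_ranks = [rank for rank, count in rank_counts.items() if count >= 2]
--     elif num_wilds == 1:
--         pair_ranks = rank_counts.keys()
--     elif num_wilds >= 2:
--         pair_ranks = [14]
--
--     if len(pair_ranks) == 0:
--         return False, {}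
--     else:
--         rank = max(pair_ranks)
--         return True, { 'rank': rank }
-- ===== SOURCE B (Python) =====
-- def get_card_rank(card):
--     return (card % 13) + 2
--
-- def one_pair_finder(natural_cards, num_wilds=0):
--     ranks = [get_card_rank(card) for card in natural_cards]
--     if num_wilds >= 2:
--         return True, {'rank': 14}
--     if num_wilds == 1:
--         return (True, {'rank': max(ranks)}) if ranks else (False, {})
--     s = sorted(ranks, reverse=True)
--     for prev, cur in zip(s, s[1:]):
--         if prev == cur:
--             return True, {'rank': cur}
--     return False, {}
-- ===== Notes on version B (the rewrite author's own statement) =====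
-- stated objective: alternative
-- what changed: Replaces the Counter + filter + max pipeline with a descending sort followed by a single adjacent-pair scan that returns at the first (hence highest) duplicated rank; the wild-card branches use the plain rank list directly instead of Counter keys.
import Mathlib
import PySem

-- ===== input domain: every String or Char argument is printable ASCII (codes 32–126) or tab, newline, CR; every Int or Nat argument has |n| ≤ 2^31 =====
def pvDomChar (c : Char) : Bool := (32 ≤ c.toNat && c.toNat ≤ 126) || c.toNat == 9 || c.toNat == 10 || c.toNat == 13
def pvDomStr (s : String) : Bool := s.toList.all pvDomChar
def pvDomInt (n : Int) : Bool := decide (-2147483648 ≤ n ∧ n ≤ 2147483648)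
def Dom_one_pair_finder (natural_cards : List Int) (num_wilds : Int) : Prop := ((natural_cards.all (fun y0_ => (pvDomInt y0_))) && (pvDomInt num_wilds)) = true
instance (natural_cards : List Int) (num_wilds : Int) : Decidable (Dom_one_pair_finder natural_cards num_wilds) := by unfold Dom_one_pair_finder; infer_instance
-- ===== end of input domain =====

-- B replaces A's Counter + filter + max pipeline by a descending sort and a single
-- adjacent-pair scan (objective: alternative, same result, different traversal).

-- ===== PORT A =====
def get_card_rank (card : Int) : Int := PySem.Int.mod card 13 + 2

def one_pair_finder (natural_cards : List Int) (num_wilds : Int) : Bool × (List (String × Int)) :=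
  let rank_counts := PySem.Dict.counter (natural_cards.map (fun card => get_card_rank card))
  let pair_ranks : List Int :=
    if num_wilds == 0 then
      (rank_counts.items.filter (fun p => 2 ≤ p.2)).map (fun p => p.1)
    else if num_wilds == 1 then
      rank_counts.keys
    else
      [14]   -- num_wilds >= 2 branch; num_wilds < 0 (where Python raises) is excluded by Pre_
  if pair_ranks.length == 0 then (false, [])
  else
    match PySem.List.max? pair_ranks (fun x => x) with
    | none => (false, [])   -- unreachable under the length guard
    | some rank => (true, [("rank", rank)])

-- ===== PORT B =====
-- the `for prev, cur in zip(s, s[1:])` loop of Source B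
def pairScan : List Int → Bool × (List (String × Int))
  | prev :: cur :: rest =>
      if prev == cur then (true, [("rank", cur)]) else pairScan (cur :: rest)
  | _ => (false, [])

def one_pair_finder_alt (natural_cards : List Int) (num_wilds : Int) : Bool × (List (String × Int)) :=
  let ranks := natural_cards.map (fun card => get_card_rank card)
  if 2 ≤ num_wilds then (true, [("rank", 14)])
  else if num_wilds == 1 then
    match PySem.List.max? ranks (fun x => x) with
    | none => (false, [])
    | some m => (true, [("rank", m)])
  else
    pairScan (PySem.List.sorted ranks (fun x => x) true)

-- ===== PRECONDITION & SPEC =====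
-- Pre_ excludes num_wilds < 0, where A's pair_ranks is never assigned and Python raises UnboundLocalError.
def Pre_one_pair_finder (natural_cards : List Int) (num_wilds : Int) : Prop := 0 ≤ num_wilds
instance (natural_cards : List Int) (num_wilds : Int) : Decidable (Pre_one_pair_finder natural_cards num_wilds) := by unfold Pre_one_pair_finder; infer_instance
def pvWitness_one_pair_finder : List Int × Int := ([0, 13, 5], 0)

def Spec_one_pair_finder (natural_cards : List Int) (num_wilds : Int) (out : Bool × (List (String × Int))) : Prop := out = one_pair_finder_alt natural_cards num_wilds
instance (natural_cards : List Int) (num_wilds : Int) (out : Bool × (List (String × Int))) : Decidable (Spec_one_pair_finder natural_cards num_wilds out) := by unfold Spec_one_pair_finder; infer_instance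

-- ===== CLAIM (what is proved, stated in full; the proofs are below) =====
def Claim_equal_one_pair_finder : Prop := ∀ (natural_cards : List Int) (num_wilds : Int), Dom_one_pair_finder natural_cards num_wilds → Pre_one_pair_finder natural_cards num_wilds → Spec_one_pair_finder natural_cards num_wilds (one_pair_finder natural_cards num_wilds)
-- ===== LEMMAS AND PROOFS =====

-- max with the identity key is determined by membership and being an upper bound
lemma max?_id_eq_some_iff (l : List Int) (m : Int) :
    PySem.List.max? l (fun x => x) = some m ↔ m ∈ l ∧ ∀ y ∈ l, y ≤ m := by
  constructor
  · intro h
    exact ⟨PySem.List.max?_mem h, fun y hy => PySem.List.max?_isMax h y hy⟩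
  · rintro ⟨hm, hub⟩
    cases hmax : PySem.List.max? l (fun x => x) with
    | none =>
        rw [PySem.List.max?_eq_none_iff] at hmax
        rw [hmax] at hm
        simp at hm
    | some m' =>
        have h1 : m' ≤ m := hub m' (PySem.List.max?_mem hmax)
        have h2 : m ≤ m' := PySem.List.max?_isMax hmax m hm
        exact congrArg some (le_antisymm h1 h2)

-- two lists with the same members have the same max-with-identity-key value
lemma max?_id_congr (l l' : List Int) (hmem : ∀ x, x ∈ l ↔ x ∈ l') :
    PySem.List.max? l (fun x => x) = PySem.List.max? l' (fun x => x) := by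
  cases h : PySem.List.max? l (fun x => x) with
  | none =>
      rw [PySem.List.max?_eq_none_iff] at h
      cases h' : PySem.List.max? l' (fun x => x) with
      | none => rfl
      | some m' =>
          have hmm := PySem.List.max?_mem h'
          rw [← hmem] at hmm
          rw [h] at hmm
          simp at hmm
  | some m =>
      rw [max?_id_eq_some_iff] at h
      symm
      rw [max?_id_eq_some_iff]
      exact ⟨(hmem m).1 h.1, fun y hy => h.2 y ((hmem y).2 hy)⟩

-- the adjacent-pair scan of a descending list answers the max-duplicate question
lemma pairScan_descending (s : List Int) (hs : s.Pairwise (fun a b => b ≤ a)) :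
    pairScan s =
      match PySem.List.max? ((PySem.Set.ofList s).filter (fun k => 2 ≤ s.count k)) (fun x => x) with
      | none => (false, [])
      | some r => (true, [("rank", r)]) := by
  induction s with
  | nil => simp [pairScan, PySem.Set.ofList, PySem.List.max?]
  | cons a t ih =>
    cases t with
    | nil =>
        simp [pairScan, PySem.Set.ofList, PySem.Set.add, PySem.List.max?, List.count_cons]
    | cons b t' =>
      have ha : ∀ y ∈ b :: t', y ≤ a := by
        intro y hy; exact (List.pairwise_cons.1 hs).1 y hy
      by_cases hab : a = b
      · -- head is duplicated: it is the answer, and it is the max of the filtered set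
        have hcnt : 2 ≤ (a :: b :: t').count a := by
          rw [List.count_cons_self]
          rw [hab, List.count_cons_self]
          omega
        have hmax : PySem.List.max?
            (((PySem.Set.ofList (a :: b :: t')).filter (fun k => 2 ≤ (a :: b :: t').count k)))
            (fun x => x) = some a := by
          rw [max?_id_eq_some_iff]
          constructor
          · rw [List.mem_filter, PySem.Set.mem_ofList]
            exact ⟨by simp, by simpa using hcnt⟩
          · intro y hy
            have hy' : y ∈ a :: b :: t' := by
              have hf := (List.mem_filter.1 hy).1
              rwa [PySem.Set.mem_ofList] at hf
            rcases List.mem_cons.1 hy' with rfl | hy''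
            · exact le_refl y
            · exact ha y hy''
        rw [hmax]
        simp [pairScan, hab]
      · -- head occurs only once: drop it and recurse
        have hba : b < a := lt_of_le_of_ne (ha b (by simp)) (fun h => hab h.symm)
        have hlt : ∀ y ∈ b :: t', y < a := by
          intro y hy
          rcases List.mem_cons.1 hy with rfl | hy'
          · exact hba
          · have h1 : y ≤ b := List.rel_of_pairwise_cons (List.pairwise_cons.1 hs).2 hy'
            omega
        have hnotmem : a ∉ b :: t' := fun h => lt_irrefl a (hlt a h)
        have htail := ih (List.pairwise_cons.1 hs).2
        have hscan : pairScan (a :: b :: t') = pairScan (b :: t') := by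
          simp [pairScan, hab]
        rw [hscan, htail]
        have hsets : ∀ x,
            x ∈ (PySem.Set.ofList (b :: t')).filter (fun k => 2 ≤ (b :: t').count k) ↔
            x ∈ (PySem.Set.ofList (a :: b :: t')).filter (fun k => 2 ≤ (a :: b :: t').count k) := by
          intro x
          simp only [List.mem_filter, PySem.Set.mem_ofList, decide_eq_true_eq]
          constructor
          · rintro ⟨hx, hc⟩
            have hxa : x ≠ a := fun h => lt_irrefl a (hlt a (h ▸ hx))
            refine ⟨List.mem_cons_of_mem a hx, ?_⟩
            simp only [List.count_cons, beq_iff_eq] at hc ⊢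
            split_ifs at hc ⊢ <;> omega
          · rintro ⟨hx, hc⟩
            by_cases hxa : x = a
            · exfalso
              subst hxa
              have h0 : (b :: t').count x = 0 := List.count_eq_zero.2 hnotmem
              rw [List.count_cons_self, h0] at hc
              omega
            · have hx' : x ∈ b :: t' := by
                rcases List.mem_cons.1 hx with h | h
                · exact absurd h hxa
                · exact h
              refine ⟨hx', ?_⟩
              simp only [List.count_cons, beq_iff_eq] at hc ⊢
              split_ifs at hc ⊢ <;> omega
        rw [max?_id_congr _ _ hsets]

-- A's pair_ranks for num_wilds == 0, massaged into the set-filter form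
lemma pair_ranks_zero (ranks : List Int) :
    ((PySem.Dict.counter ranks).items.filter (fun p => 2 ≤ p.2)).map (fun p => p.1) =
      (PySem.Set.ofList ranks).filter (fun k => 2 ≤ ranks.count k) := by
  rw [PySem.Dict.items_counter]
  rw [List.filter_map, List.map_map]
  simp [Function.comp_def]

-- a list and its descending sort have the same filtered duplicate set (memberwise)
lemma filter_sorted_mem (ranks : List Int) (x : Int) :
    x ∈ (PySem.Set.ofList (PySem.List.sorted ranks (fun y => y) true)).filter
          (fun k => 2 ≤ (PySem.List.sorted ranks (fun y => y) true).count k) ↔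
    x ∈ (PySem.Set.ofList ranks).filter (fun k => 2 ≤ ranks.count k) := by
  have hperm : (PySem.List.sorted ranks (fun y => y) true).Perm ranks :=
    PySem.List.sorted_perm ranks (fun y => y) true
  simp only [List.mem_filter, PySem.Set.mem_ofList, decide_eq_true_eq]
  rw [hperm.mem_iff, hperm.count_eq]

-- ===== VERDICT (by name: the statement is the Claim_ definition above) =====
theorem one_pair_finder_spec : Claim_equal_one_pair_finder := by
  intro natural_cards num_wilds _ hpre
  unfold Spec_one_pair_finder one_pair_finder one_pair_finder_alt
  unfold Pre_one_pair_finder at hpre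
  set ranks := natural_cards.map (fun card => get_card_rank card) with hranks
  by_cases h2 : 2 ≤ num_wilds
  · -- wilds >= 2
    have h0 : ¬ (num_wilds == 0) = true := by simp; omega
    have h1 : ¬ (num_wilds == 1) = true := by simp; omega
    simp only [h2, if_true, h0, if_false, h1]
    simp [PySem.List.max?]
  · by_cases h1 : num_wilds = 1
    · -- one wild: max of counter keys vs max of ranks
      subst h1
      simp only [if_neg h2]
      norm_num
      have hmem : ∀ x, x ∈ PySem.Set.ofList ranks ↔ x ∈ ranks := by
        intro x; exact PySem.Set.mem_ofList ..
      rw [max?_id_congr _ _ hmem]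
      cases hmax : PySem.List.max? ranks (fun x => x) with
      | none =>
          rw [PySem.List.max?_eq_none_iff] at hmax
          rw [hmax]
          simp [PySem.Set.ofList, PySem.List.max?]
      | some m =>
          have hne : ranks ≠ [] := by
            intro h; rw [h] at hmax; simp [PySem.List.max?] at hmax
          have hkne : ¬ (PySem.Set.ofList ranks = []) := by
            intro h
            cases hr : ranks with
            | nil => exact hne hr
            | cons a t =>
                have hmem' : a ∈ PySem.Set.ofList ranks := by
                  rw [PySem.Set.mem_ofList]; simp [hr]
                rw [h] at hmem'
                simp at hmem'
          simp [hkne, hmax]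
    · -- no wilds: num_wilds = 0 under Pre_
      have h0 : num_wilds = 0 := by omega
      subst h0
      simp only [if_neg h2]
      norm_num
      rw [pair_ranks_zero]
      have hsorted : (PySem.List.sorted ranks (fun y => y) true).Pairwise (fun a b => b ≤ a) :=
        PySem.List.sorted_pairwise_rev ranks (fun y => y)
      rw [pairScan_descending _ hsorted]
      rw [max?_id_congr _ _ (filter_sorted_mem ranks)]
      cases hmax : PySem.List.max? ((PySem.Set.ofList ranks).filter (fun k => 2 ≤ ranks.count k)) (fun x => x) with
      | none =>
          rw [PySem.List.max?_eq_none_iff] at hmax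
          simp [hmax]
      | some m =>
          have hne : (PySem.Set.ofList ranks).filter (fun k => 2 ≤ ranks.count k) ≠ [] := by
            intro h; rw [h] at hmax; simp [PySem.List.max?] at hmax
          have : ¬ (((PySem.Set.ofList ranks).filter (fun k => 2 ≤ ranks.count k)).length == 0) = true := by
            simp [List.length_eq_zero_iff, hne]
          simp [this]
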